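-- pv_equiv track=rewrite | github.com/kkuntner/advent-of-code-2024 | 12/twelve.py | region_to_map
-- ===== SOURCE A (Python) =====
-- def region_to_map(region):
--     xmin = min(region, key = lambda x: x[0])[0]
--     ymin = min(region, key = lambda x: x[1])[1]
--     xmax = max(region, key = lambda x: x[0])[0]
--     ymax = max(region, key = lambda x: x[1])[1]
--
--     map = [[0 for i in range(xmax-xmin+1)] for j in range(ymax-ymin+1)]
--     for x, y in region:
--         map[y-ymin][x-xmin] = 1
--     return map
-- ===== SOURCE B (Python) =====
-- def region_to_map(region):
--     x0, y0 = region[0]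
--     xmin = xmax = x0
--     ymin = ymax = y0
--     for x, y in region[1:]:
--         xmin = min(xmin, x)
--         xmax = max(xmax, x)
--         ymin = min(ymin, y)
--         ymax = max(ymax, y)
--     cells = set(region)
--     return [[1 if (xmin + i, ymin + j) in cells else 0
--              for i in range(xmax - xmin + 1)]
--             for j in range(ymax - ymin + 1)]
-- ===== Notes on version B (the rewrite author's own statement) =====
-- stated objective: alternative
-- what changed: One fold computes all four bounds instead of four min/max scans, and the grid is built directly by a set-membership comprehension instead of allocating a zero grid and mutating cells.
import Mathlib
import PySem

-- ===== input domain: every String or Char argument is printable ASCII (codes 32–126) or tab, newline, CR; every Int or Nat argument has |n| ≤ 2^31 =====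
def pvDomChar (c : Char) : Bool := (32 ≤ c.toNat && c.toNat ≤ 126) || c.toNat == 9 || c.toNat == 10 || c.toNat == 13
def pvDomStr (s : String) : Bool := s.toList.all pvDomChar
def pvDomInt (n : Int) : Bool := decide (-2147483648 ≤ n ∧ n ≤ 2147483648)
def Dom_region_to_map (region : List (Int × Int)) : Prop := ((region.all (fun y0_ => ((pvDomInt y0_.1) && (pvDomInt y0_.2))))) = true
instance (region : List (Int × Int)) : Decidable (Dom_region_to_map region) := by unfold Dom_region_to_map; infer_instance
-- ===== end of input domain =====

-- B replaces the four min/max scans by one bounds fold and builds the grid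
-- directly by set membership instead of mutating a zero grid (objective: alternative).

-- ===== PORT A =====
-- the loop body 'map[y-ymin][x-xmin] = 1': both indices are nonnegative and in
-- range for every point of the region (ymin/xmin are the minima), so List.set on
-- the toNat indices is exact here.
def pvMark (ymin xmin : Int) (g : List (List Int)) (p : Int × Int) : List (List Int) :=
  g.set (p.2 - ymin).toNat ((g.getD (p.2 - ymin).toNat []).set (p.1 - xmin).toNat 1)

def region_to_map (region : List (Int × Int)) : List (List Int) :=
  match PySem.List.min? region (fun p => p.1), PySem.List.min? region (fun p => p.2),
        PySem.List.max? region (fun p => p.1), PySem.List.max? region (fun p => p.2) with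
  | some pxmin, some pymin, some pxmax, some pymax =>
      let xmin := pxmin.1
      let ymin := pymin.2
      let xmax := pxmax.1
      let ymax := pymax.2
      let grid : List (List Int) :=
        List.replicate (ymax - ymin + 1).toNat (List.replicate (xmax - xmin + 1).toNat 0)
      region.foldl (pvMark ymin xmin) grid
  | _, _, _, _ => []  -- min() on the empty region raises ValueError; excluded by Pre_

-- ===== PORT B =====
-- one pass updating (xmin, xmax, ymin, ymax) at once
def pvBounds (b : Int × Int × Int × Int) (p : Int × Int) : Int × Int × Int × Int :=
  (min b.1 p.1, max b.2.1 p.1, min b.2.2.1 p.2, max b.2.2.2 p.2)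

def region_to_map_alt (region : List (Int × Int)) : List (List Int) :=
  match region with
  | [] => []  -- region[0] raises IndexError; excluded by Pre_
  | (x0, y0) :: rest =>
      let b := rest.foldl pvBounds (x0, x0, y0, y0)
      let cells : PySem.Set (Int × Int) := PySem.Set.ofList region
      (List.range (b.2.2.2 - b.2.2.1 + 1).toNat).map (fun (j : Nat) =>
        (List.range (b.2.1 - b.1 + 1).toNat).map (fun (i : Nat) =>
          if PySem.Set.contains cells (b.1 + (i : Int), b.2.2.1 + (j : Int)) then 1 else 0))

-- ===== PRECONDITION & SPEC =====
-- Pre_ excludes only the empty region, on which A raises ValueError (min of empty).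
def Pre_region_to_map (region : List (Int × Int)) : Prop := region ≠ []
instance (region : List (Int × Int)) : Decidable (Pre_region_to_map region) := by
  unfold Pre_region_to_map; infer_instance
def pvWitness_region_to_map : (List (Int × Int)) := [(0, 0), (2, 1)]

def Spec_region_to_map (region : List (Int × Int)) (out : List (List Int)) : Prop := out = region_to_map_alt region
instance (region : List (Int × Int)) (out : List (List Int)) : Decidable (Spec_region_to_map region out) := by unfold Spec_region_to_map; infer_instance

-- ===== CLAIM (what is proved, stated in full; the proofs are below) =====
def Claim_equal_region_to_map : Prop := ∀ (region : List (Int × Int)), Dom_region_to_map region → Pre_region_to_map region → Spec_region_to_map region (region_to_map region)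

-- ===== LEMMAS AND PROOFS =====

-- the combined bounds fold is the four separate folds
theorem pvBounds_foldl (rest : List (Int × Int)) (a b c d : Int) :
    rest.foldl pvBounds (a, b, c, d) =
      ((rest.map Prod.fst).foldl min a, (rest.map Prod.fst).foldl max b,
       (rest.map Prod.snd).foldl min c, (rest.map Prod.snd).foldl max d) := by
  induction rest generalizing a b c d with
  | nil => rfl
  | cons p t ih => simp [pvBounds, ih, List.foldl_map]

-- the key of a min?/max? result equals the running fold over the tail
theorem min_key_eq (f : Int × Int → Int) (h : Int × Int) (rest : List (Int × Int))
    (q : Int × Int) (hq : PySem.List.min? (h :: rest) f = some q) :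
    f q = (rest.map f).foldl min (f h) := by
  have hmem := PySem.List.min?_mem hq
  have hmin := PySem.List.min?_isMin hq
  have h1 := PySem.List.foldl_min_le (rest.map f) (f h)
  have h2 := PySem.List.foldl_min_mem (rest.map f) (f h)
  apply le_antisymm
  · rcases h2 with h2 | h2
    · rw [h2]; exact hmin h List.mem_cons_self
    · obtain ⟨p, hp, hfp⟩ := List.mem_map.mp h2
      rw [← hfp]; exact hmin p (List.mem_cons_of_mem _ hp)
  · rcases List.mem_cons.mp hmem with rfl | hm
    · exact h1.1
    · exact h1.2 (f q) (List.mem_map_of_mem hm)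

theorem max_key_eq (f : Int × Int → Int) (h : Int × Int) (rest : List (Int × Int))
    (q : Int × Int) (hq : PySem.List.max? (h :: rest) f = some q) :
    f q = (rest.map f).foldl max (f h) := by
  have hmem := PySem.List.max?_mem hq
  have hmax := PySem.List.max?_isMax hq
  have h1 := PySem.List.le_foldl_max (rest.map f) (f h)
  have h2 := PySem.List.foldl_max_mem (rest.map f) (f h)
  apply le_antisymm
  · rcases List.mem_cons.mp hmem with rfl | hm
    · exact h1.1
    · exact h1.2 (f q) (List.mem_map_of_mem hm)
  · rcases h2 with h2 | h2
    · rw [h2]; exact hmax h List.mem_cons_self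
    · obtain ⟨p, hp, hfp⟩ := List.mem_map.mp h2
      rw [← hfp]; exact hmax p (List.mem_cons_of_mem _ hp)

def pvCell (g : List (List Int)) (j i : Nat) : Int := (g.getD j []).getD i 0

theorem mark_length (ymin xmin : Int) (g : List (List Int)) (p : Int × Int) :
    (pvMark ymin xmin g p).length = g.length := by simp [pvMark]

theorem mark_rows (ymin xmin : Int) (W : Nat) (g : List (List Int)) (p : Int × Int)
    (hr : ∀ r ∈ g, r.length = W) (hj : (p.2 - ymin).toNat < g.length) :
    ∀ r ∈ pvMark ymin xmin g p, r.length = W := by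
  intro r hrm
  rcases List.mem_or_eq_of_mem_set hrm with hm | rfl
  · exact hr r hm
  · rw [List.length_set, List.getD_eq_getElem _ _ hj]
    exact hr _ (List.getElem_mem hj)

theorem cell_mark (ymin xmin : Int) (W : Nat) (g : List (List Int)) (p : Int × Int)
    (hr : ∀ r ∈ g, r.length = W)
    (hp1 : xmin ≤ p.1) (hp2 : ymin ≤ p.2)
    (hpw : (p.1 - xmin).toNat < W) (hph : (p.2 - ymin).toNat < g.length)
    (j i : Nat) (hj : j < g.length) (hi : i < W) :
    pvCell (pvMark ymin xmin g p) j i =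
      if (xmin + (i : Int), ymin + (j : Int)) = p then 1 else pvCell g j i := by
  have hrowlen : (g.getD (p.2 - ymin).toNat []).length = W := by
    rw [List.getD_eq_getElem _ _ hph]; exact hr _ (List.getElem_mem hph)
  unfold pvMark pvCell
  by_cases hjj : j = (p.2 - ymin).toNat
  · have hget : (g.set (p.2 - ymin).toNat ((g.getD (p.2 - ymin).toNat []).set (p.1 - xmin).toNat 1)).getD j [] =
        (g.getD (p.2 - ymin).toNat []).set (p.1 - xmin).toNat 1 := by
      rw [hjj, List.getD_eq_getElem _ _ (by simpa using hph), List.getElem_set_self]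
    rw [hget]
    by_cases hii : i = (p.1 - xmin).toNat
    · have hgi : ((g.getD (p.2 - ymin).toNat []).set (p.1 - xmin).toNat 1).getD i 0 = 1 := by
        rw [hii, List.getD_eq_getElem _ _ (by rw [List.length_set]; exact lt_of_lt_of_eq hpw hrowlen.symm), List.getElem_set_self]
      rw [hgi]
      have heq : (xmin + (i : Int), ymin + (j : Int)) = p := by
        obtain ⟨p1, p2⟩ := p
        simp only [Prod.mk.injEq]
        simp only at hp1 hp2 hjj hii
        constructor <;> omega
      rw [if_pos heq]
    · have hne : (xmin + (i : Int), ymin + (j : Int)) ≠ p := by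
        intro hcontra
        apply hii
        have h1 := congrArg Prod.fst hcontra
        simp only at h1
        omega
      rw [if_neg hne, hjj]
      have hlt : i < (g.getD (p.2 - ymin).toNat []).length := lt_of_lt_of_eq hi hrowlen.symm
      rw [List.getD_eq_getElem _ _ (by rw [List.length_set]; exact hlt),
          List.getElem_set_ne (by omega), List.getD_eq_getElem _ _ hlt]
  · have hget : (g.set (p.2 - ymin).toNat ((g.getD (p.2 - ymin).toNat []).set (p.1 - xmin).toNat 1)).getD j [] = g.getD j [] := by
      rw [List.getD_eq_getElem _ _ (by simpa using hj),
          List.getElem_set_ne (by omega), ← List.getD_eq_getElem _ _ hj]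
    rw [hget]
    have hne : (xmin + (i : Int), ymin + (j : Int)) ≠ p := by
      intro hcontra
      apply hjj
      have h2 := congrArg Prod.snd hcontra
      simp only at h2
      omega
    rw [if_neg hne]

theorem foldl_mark_length (ymin xmin : Int) (pts : List (Int × Int)) (g : List (List Int)) :
    (pts.foldl (pvMark ymin xmin) g).length = g.length := by
  induction pts generalizing g with
  | nil => rfl
  | cons p t ih => rw [List.foldl_cons, ih, mark_length]

theorem foldl_mark_rows (ymin xmin : Int) (W : Nat) (pts : List (Int × Int)) (g : List (List Int))
    (hr : ∀ r ∈ g, r.length = W)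
    (hb : ∀ p ∈ pts, (p.2 - ymin).toNat < g.length) :
    ∀ r ∈ pts.foldl (pvMark ymin xmin) g, r.length = W := by
  induction pts generalizing g with
  | nil => exact hr
  | cons p t ih =>
      rw [List.foldl_cons]
      refine ih _ (mark_rows _ _ _ _ _ hr (hb p List.mem_cons_self)) ?_
      intro q hq
      rw [mark_length]
      exact hb q (List.mem_cons_of_mem _ hq)

theorem cell_foldl_mark (ymin xmin : Int) (W : Nat) (pts : List (Int × Int))
    (g : List (List Int)) (hr : ∀ r ∈ g, r.length = W)
    (hb : ∀ p ∈ pts, xmin ≤ p.1 ∧ ymin ≤ p.2 ∧ (p.1 - xmin).toNat < W ∧ (p.2 - ymin).toNat < g.length)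
    (j i : Nat) (hj : j < g.length) (hi : i < W) :
    pvCell (pts.foldl (pvMark ymin xmin) g) j i =
      if (xmin + (i : Int), ymin + (j : Int)) ∈ pts then 1 else pvCell g j i := by
  induction pts generalizing g with
  | nil => simp
  | cons p t ih =>
      obtain ⟨hb1, hb2, hb3, hb4⟩ := hb p List.mem_cons_self
      rw [List.foldl_cons]
      have hstep := ih (pvMark ymin xmin g p)
        (mark_rows _ _ _ _ _ hr hb4)
        (by intro q hq; have := hb q (List.mem_cons_of_mem _ hq)
            simpa [mark_length] using this)
        (by simpa [mark_length] using hj)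
      rw [hstep, cell_mark ymin xmin W g p hr hb1 hb2 hb3 hb4 j i hj hi]
      by_cases hmem : (xmin + (i : Int), ymin + (j : Int)) ∈ t
      · simp [hmem]
      · by_cases heq : (xmin + (i : Int), ymin + (j : Int)) = p
        · simp [heq]
        · simp [heq]

-- main grid equality: the marked zero grid equals the membership-built grid
theorem grid_eq (xmin xmax ymin ymax : Int) (pts : List (Int × Int))
    (hb : ∀ p ∈ pts, xmin ≤ p.1 ∧ p.1 ≤ xmax ∧ ymin ≤ p.2 ∧ p.2 ≤ ymax) :
    pts.foldl (pvMark ymin xmin)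
        (List.replicate (ymax - ymin + 1).toNat (List.replicate (xmax - xmin + 1).toNat 0))
      = (List.range (ymax - ymin + 1).toNat).map (fun (j : Nat) =>
          (List.range (xmax - xmin + 1).toNat).map (fun (i : Nat) =>
            if PySem.Set.contains (PySem.Set.ofList pts) (xmin + (i : Int), ymin + (j : Int)) then 1 else 0)) := by
  set H := (ymax - ymin + 1).toNat with hH
  set W := (xmax - xmin + 1).toNat with hW
  set g0 : List (List Int) := List.replicate H (List.replicate W 0) with hg0
  have hr0 : ∀ r ∈ g0, r.length = W := by
    intro r hrm
    rw [List.eq_of_mem_replicate hrm, List.length_replicate]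
  have hlen0 : g0.length = H := List.length_replicate
  have hb' : ∀ p ∈ pts, xmin ≤ p.1 ∧ ymin ≤ p.2 ∧ (p.1 - xmin).toNat < W ∧ (p.2 - ymin).toNat < g0.length := by
    intro p hp
    obtain ⟨h1, h2, h3, h4⟩ := hb p hp
    refine ⟨h1, h3, by omega, by rw [hlen0]; omega⟩
  apply List.ext_getElem
  · rw [foldl_mark_length, hlen0, List.length_map, List.length_range]
  · intro j hj1 hj2
    rw [foldl_mark_length, hlen0] at hj1
    apply List.ext_getElem
    · have hmem : (pts.foldl (pvMark ymin xmin) g0)[j] ∈ pts.foldl (pvMark ymin xmin) g0 :=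
        List.getElem_mem _
      rw [foldl_mark_rows ymin xmin W pts g0 hr0 (fun p hp => (hb' p hp).2.2.2) _ hmem]
      simp
    · intro i hi1 hi2
      have hrows := foldl_mark_rows ymin xmin W pts g0 hr0 (fun p hp => (hb' p hp).2.2.2)
      have hjlen : j < (pts.foldl (pvMark ymin xmin) g0).length := by
        rw [foldl_mark_length, hlen0]; exact hj1
      have hiW : i < W := by
        have := hrows _ (List.getElem_mem hjlen)
        omega
      have hcell : (pts.foldl (pvMark ymin xmin) g0)[j][i] =
          pvCell (pts.foldl (pvMark ymin xmin) g0) j i := by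
        unfold pvCell
        rw [List.getD_eq_getElem _ _ hjlen, List.getD_eq_getElem]
      rw [hcell, cell_foldl_mark ymin xmin W pts g0 hr0 hb' j i (by rwa [hlen0]) hiW]
      have hcell0 : pvCell g0 j i = 0 := by
        unfold pvCell
        rw [hg0, List.getD_replicate _ hj1, List.getD_replicate _ hiW]
      rw [hcell0]
      simp only [List.getElem_map, List.getElem_range]
      by_cases hm : (xmin + (i : Int), ymin + (j : Int)) ∈ pts
      · rw [if_pos hm, if_pos (by rw [PySem.Set.contains_iff, PySem.Set.mem_ofList]; exact hm)]
      · rw [if_neg hm, if_neg (by rw [PySem.Set.contains_iff, PySem.Set.mem_ofList]; exact hm)]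

-- ===== VERDICT (by name: the statement is the Claim_ definition above) =====
theorem region_to_map_spec : Claim_equal_region_to_map := by
  intro region _ hpre
  unfold Spec_region_to_map
  cases region with
  | nil => exact absurd rfl hpre
  | cons h rest =>
    obtain ⟨x0, y0⟩ := h
    cases hq1 : PySem.List.min? ((x0, y0) :: rest) (fun p => p.1) with
    | none => rw [PySem.List.min?_eq_none_iff] at hq1; cases hq1
    | some q1 =>
    cases hq2 : PySem.List.min? ((x0, y0) :: rest) (fun p => p.2) with
    | none => rw [PySem.List.min?_eq_none_iff] at hq2; cases hq2
    | some q2 =>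
    cases hq3 : PySem.List.max? ((x0, y0) :: rest) (fun p => p.1) with
    | none => rw [PySem.List.max?_eq_none_iff] at hq3; cases hq3
    | some q3 =>
    cases hq4 : PySem.List.max? ((x0, y0) :: rest) (fun p => p.2) with
    | none => rw [PySem.List.max?_eq_none_iff] at hq4; cases hq4
    | some q4 =>
    have e1 : q1.1 = (rest.map Prod.fst).foldl min x0 := min_key_eq (fun p => p.1) _ _ _ hq1
    have e2 : q2.2 = (rest.map Prod.snd).foldl min y0 := min_key_eq (fun p => p.2) _ _ _ hq2
    have e3 : q3.1 = (rest.map Prod.fst).foldl max x0 := max_key_eq (fun p => p.1) _ _ _ hq3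
    have e4 : q4.2 = (rest.map Prod.snd).foldl max y0 := max_key_eq (fun p => p.2) _ _ _ hq4
    have hbnds : ∀ p ∈ (x0, y0) :: rest, q1.1 ≤ p.1 ∧ p.1 ≤ q3.1 ∧ q2.2 ≤ p.2 ∧ p.2 ≤ q4.2 := by
      intro p hp
      exact ⟨PySem.List.min?_isMin hq1 p hp, PySem.List.max?_isMax hq3 p hp,
             PySem.List.min?_isMin hq2 p hp, PySem.List.max?_isMax hq4 p hp⟩
    show region_to_map _ = region_to_map_alt _
    unfold region_to_map region_to_map_alt
    rw [hq1, hq2, hq3, hq4]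
    simp only [pvBounds_foldl]
    rw [← e1, ← e2, ← e3, ← e4]
    exact grid_eq q1.1 q3.1 q2.2 q4.2 _ hbnds
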